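-- pv_equiv track=rewrite | github.com/underhood31/Network-Security | Assignment2/AES/AES_Encryptor.py | to_state
-- ===== SOURCE A (Python) =====
-- def to_state(inp):
--     """
--         converts 128 bit number to tate representation
--         ---------------------------s-------------------------TODO: ADD compatibility for 192 and 256 bit input-----------------------------------------
--     """
--     state = []
--     j = 0
--     while(j<32):
--         i = j
--         s = []
--         while(i<128):
--             s.append(inp[i:i+8])
--             i+=32
--         state.append(s)
--         j+=8
--     return state
-- ===== SOURCE B (Python) =====
-- def to_state(inp):
--     # Single pass: consume the input 8 chars at a time, dealing the chunks
--     # round-robin into 4 row accumulators (chunk n goes to row n % 4).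
--     rows = [[], [], [], []]
--     rest = inp
--     for n in range(16):
--         rows[n % 4].append(rest[:8])
--         rest = rest[8:]
--     return rows
-- ===== Notes on version B (the rewrite author's own statement) =====
-- stated objective: alternative
-- what changed: B makes a single pass that consumes the input string 8 characters at a time (take 8 / drop 8 on the remaining suffix) and deals each chunk round-robin into 4 row accumulators (chunk n goes to row n % 4), instead of A's nested while loops slicing the original string at stride-32 index offsets.
import Mathlib
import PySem

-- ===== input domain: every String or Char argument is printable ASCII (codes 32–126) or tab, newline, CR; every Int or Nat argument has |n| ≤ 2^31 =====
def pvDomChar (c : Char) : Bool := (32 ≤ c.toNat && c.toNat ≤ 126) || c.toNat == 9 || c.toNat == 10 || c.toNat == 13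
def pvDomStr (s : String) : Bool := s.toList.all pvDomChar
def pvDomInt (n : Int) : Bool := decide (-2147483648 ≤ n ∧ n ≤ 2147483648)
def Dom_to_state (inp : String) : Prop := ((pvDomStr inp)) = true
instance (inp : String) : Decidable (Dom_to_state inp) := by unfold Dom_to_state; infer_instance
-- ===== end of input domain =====

-- B replaces A's nested stride-32 index slicing by a single pass that consumes the input
-- 8 characters at a time and deals the chunks round-robin into 4 row accumulators.

-- ===== PORT A =====
-- inner 'while i < 128' loop: appends inp[i:i+8], steps i += 32 (fuel bounds the iterations; 5 > 128/32)
def toStateInner (inp : String) : Nat → Int → List String → List String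
  | 0, _, s => s
  | fuel + 1, i, s =>
    if i < 128 then
      toStateInner inp fuel (i + 32) (s ++ [PySem.Str.slice inp (some i) (some (i + 8))])
    else s

-- outer 'while j < 32' loop: builds one row from j, steps j += 8 (fuel 5 > 32/8)
def toStateOuter (inp : String) : Nat → Int → List (List String) → List (List String)
  | 0, _, st => st
  | fuel + 1, j, st =>
    if j < 32 then
      toStateOuter inp fuel (j + 8) (st ++ [toStateInner inp 5 j []])
    else st

def to_state (inp : String) : List (List String) :=
  toStateOuter inp 5 0 []

-- ===== PORT B =====
-- loop body of Source B: rows[n % 4].append(rest[:8]); rest = rest[8:]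
-- (rows[k].append(x) is pySetD rows k (pyGetD rows k [] ++ [x]); rest[:8] / rest[8:] are Str.slice)
def toStateStep (st : List (List String) × String) (n : Int) : List (List String) × String :=
  let k := PySem.Int.mod n 4
  (PySem.List.pySetD st.1 k
     (PySem.List.pyGetD st.1 k [] ++ [PySem.Str.slice st.2 none (some 8)]),
   PySem.Str.slice st.2 (some 8) none)

-- 'for n in range(16): …' as a fold of the loop body over the range, state = (rows, rest)
def to_state_alt (inp : String) : List (List String) :=
  ((PySem.List.pyRange 0 16 1).foldl toStateStep ([[], [], [], []], inp)).1

-- ===== PRECONDITION & SPEC =====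
def Spec_to_state (inp : String) (out : List (List String)) : Prop := out = to_state_alt inp
instance (inp : String) (out : List (List String)) : Decidable (Spec_to_state inp out) := by unfold Spec_to_state; infer_instance

-- ===== CLAIM (what is proved, stated in full; the proofs are below) =====
def Claim_equal_to_state : Prop := ∀ (inp : String), Dom_to_state inp → Spec_to_state inp (to_state inp)

-- ===== LEMMAS AND PROOFS =====

-- rest after t loop iterations of B: inp with t*8 leading characters dropped
def drops (inp : String) : Nat → String
  | 0 => inp
  | t+1 => PySem.Str.slice (drops inp t) (some 8) none

-- the chunk B appends at iteration t
def chunk (inp : String) (t : Nat) : String := PySem.Str.slice (drops inp t) none (some 8)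

lemma drops_toList (inp : String) (t : Nat) : (drops inp t).toList = inp.toList.drop (8*t) := by
  induction t with
  | zero => simp [drops]
  | succ t ih =>
    rw [drops, PySem.Str.toList_slice]
    simp only [PySem.Chars.slice_eq_listSlice, PySem.List.slice_from _ (by norm_num : (0:Int) ≤ 8), ih, List.drop_drop]
    congr 1

lemma chunk_eq (inp : String) (t : Nat) :
    chunk inp t = PySem.Str.slice inp (some (8*(t:Int))) (some (8*(t:Int)+8)) := by
  apply String.toList_inj.mp
  rw [chunk, PySem.Str.toList_slice]
  simp only [PySem.Chars.slice_eq_listSlice, PySem.List.slice_to _ (by norm_num : (0:Int) ≤ 8),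
    drops_toList, PySem.Str.toList_slice,
    PySem.List.slice_toNat _ (by positivity : (0:Int) ≤ 8*(t:Int)) (by positivity : (0:Int) ≤ 8*(t:Int)+8)]
  congr 1
  omega

-- B unfolded: 16 loop iterations dealt round-robin into the 4 rows
lemma alt_eq (inp : String) : to_state_alt inp = [[chunk inp 0, chunk inp 4, chunk inp 8, chunk inp 12], [chunk inp 1, chunk inp 5, chunk inp 9, chunk inp 13], [chunk inp 2, chunk inp 6, chunk inp 10, chunk inp 14], [chunk inp 3, chunk inp 7, chunk inp 11, chunk inp 15]] := by
  simp only [to_state_alt,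
    show PySem.List.pyRange 0 16 1 = [0,1,2,3,4,5,6,7,8,9,10,11,12,13,14,15] from by decide,
    List.foldl_cons, List.foldl_nil]
  rw [show toStateStep ([[], [], [], []], inp) 0 = ([[chunk inp 0], [], [], []], drops inp 1) from rfl]
  rw [show toStateStep ([[chunk inp 0], [], [], []], drops inp 1) 1 = ([[chunk inp 0], [chunk inp 1], [], []], drops inp 2) from rfl]
  rw [show toStateStep ([[chunk inp 0], [chunk inp 1], [], []], drops inp 2) 2 = ([[chunk inp 0], [chunk inp 1], [chunk inp 2], []], drops inp 3) from rfl]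
  rw [show toStateStep ([[chunk inp 0], [chunk inp 1], [chunk inp 2], []], drops inp 3) 3 = ([[chunk inp 0], [chunk inp 1], [chunk inp 2], [chunk inp 3]], drops inp 4) from rfl]
  rw [show toStateStep ([[chunk inp 0], [chunk inp 1], [chunk inp 2], [chunk inp 3]], drops inp 4) 4 = ([[chunk inp 0, chunk inp 4], [chunk inp 1], [chunk inp 2], [chunk inp 3]], drops inp 5) from rfl]
  rw [show toStateStep ([[chunk inp 0, chunk inp 4], [chunk inp 1], [chunk inp 2], [chunk inp 3]], drops inp 5) 5 = ([[chunk inp 0, chunk inp 4], [chunk inp 1, chunk inp 5], [chunk inp 2], [chunk inp 3]], drops inp 6) from rfl]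
  rw [show toStateStep ([[chunk inp 0, chunk inp 4], [chunk inp 1, chunk inp 5], [chunk inp 2], [chunk inp 3]], drops inp 6) 6 = ([[chunk inp 0, chunk inp 4], [chunk inp 1, chunk inp 5], [chunk inp 2, chunk inp 6], [chunk inp 3]], drops inp 7) from rfl]
  rw [show toStateStep ([[chunk inp 0, chunk inp 4], [chunk inp 1, chunk inp 5], [chunk inp 2, chunk inp 6], [chunk inp 3]], drops inp 7) 7 = ([[chunk inp 0, chunk inp 4], [chunk inp 1, chunk inp 5], [chunk inp 2, chunk inp 6], [chunk inp 3, chunk inp 7]], drops inp 8) from rfl]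
  rw [show toStateStep ([[chunk inp 0, chunk inp 4], [chunk inp 1, chunk inp 5], [chunk inp 2, chunk inp 6], [chunk inp 3, chunk inp 7]], drops inp 8) 8 = ([[chunk inp 0, chunk inp 4, chunk inp 8], [chunk inp 1, chunk inp 5], [chunk inp 2, chunk inp 6], [chunk inp 3, chunk inp 7]], drops inp 9) from rfl]
  rw [show toStateStep ([[chunk inp 0, chunk inp 4, chunk inp 8], [chunk inp 1, chunk inp 5], [chunk inp 2, chunk inp 6], [chunk inp 3, chunk inp 7]], drops inp 9) 9 = ([[chunk inp 0, chunk inp 4, chunk inp 8], [chunk inp 1, chunk inp 5, chunk inp 9], [chunk inp 2, chunk inp 6], [chunk inp 3, chunk inp 7]], drops inp 10) from rfl]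
  rw [show toStateStep ([[chunk inp 0, chunk inp 4, chunk inp 8], [chunk inp 1, chunk inp 5, chunk inp 9], [chunk inp 2, chunk inp 6], [chunk inp 3, chunk inp 7]], drops inp 10) 10 = ([[chunk inp 0, chunk inp 4, chunk inp 8], [chunk inp 1, chunk inp 5, chunk inp 9], [chunk inp 2, chunk inp 6, chunk inp 10], [chunk inp 3, chunk inp 7]], drops inp 11) from rfl]
  rw [show toStateStep ([[chunk inp 0, chunk inp 4, chunk inp 8], [chunk inp 1, chunk inp 5, chunk inp 9], [chunk inp 2, chunk inp 6, chunk inp 10], [chunk inp 3, chunk inp 7]], drops inp 11) 11 = ([[chunk inp 0, chunk inp 4, chunk inp 8], [chunk inp 1, chunk inp 5, chunk inp 9], [chunk inp 2, chunk inp 6, chunk inp 10], [chunk inp 3, chunk inp 7, chunk inp 11]], drops inp 12) from rfl]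
  rw [show toStateStep ([[chunk inp 0, chunk inp 4, chunk inp 8], [chunk inp 1, chunk inp 5, chunk inp 9], [chunk inp 2, chunk inp 6, chunk inp 10], [chunk inp 3, chunk inp 7, chunk inp 11]], drops inp 12) 12 = ([[chunk inp 0, chunk inp 4, chunk inp 8, chunk inp 12], [chunk inp 1, chunk inp 5, chunk inp 9], [chunk inp 2, chunk inp 6, chunk inp 10], [chunk inp 3, chunk inp 7, chunk inp 11]], drops inp 13) from rfl]
  rw [show toStateStep ([[chunk inp 0, chunk inp 4, chunk inp 8, chunk inp 12], [chunk inp 1, chunk inp 5, chunk inp 9], [chunk inp 2, chunk inp 6, chunk inp 10], [chunk inp 3, chunk inp 7, chunk inp 11]], drops inp 13) 13 = ([[chunk inp 0, chunk inp 4, chunk inp 8, chunk inp 12], [chunk inp 1, chunk inp 5, chunk inp 9, chunk inp 13], [chunk inp 2, chunk inp 6, chunk inp 10], [chunk inp 3, chunk inp 7, chunk inp 11]], drops inp 14) from rfl]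
  rw [show toStateStep ([[chunk inp 0, chunk inp 4, chunk inp 8, chunk inp 12], [chunk inp 1, chunk inp 5, chunk inp 9, chunk inp 13], [chunk inp 2, chunk inp 6, chunk inp 10], [chunk inp 3, chunk inp 7, chunk inp 11]], drops inp 14) 14 = ([[chunk inp 0, chunk inp 4, chunk inp 8, chunk inp 12], [chunk inp 1, chunk inp 5, chunk inp 9, chunk inp 13], [chunk inp 2, chunk inp 6, chunk inp 10, chunk inp 14], [chunk inp 3, chunk inp 7, chunk inp 11]], drops inp 15) from rfl]
  rw [show toStateStep ([[chunk inp 0, chunk inp 4, chunk inp 8, chunk inp 12], [chunk inp 1, chunk inp 5, chunk inp 9, chunk inp 13], [chunk inp 2, chunk inp 6, chunk inp 10, chunk inp 14], [chunk inp 3, chunk inp 7, chunk inp 11]], drops inp 15) 15 = ([[chunk inp 0, chunk inp 4, chunk inp 8, chunk inp 12], [chunk inp 1, chunk inp 5, chunk inp 9, chunk inp 13], [chunk inp 2, chunk inp 6, chunk inp 10, chunk inp 14], [chunk inp 3, chunk inp 7, chunk inp 11, chunk inp 15]], drops inp 16) from rfl]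

-- A unfolded: the 4x4 grid of stride-32 slices
lemma a_eq (inp : String) : to_state inp = [
    [PySem.Str.slice inp (some 0) (some 8), PySem.Str.slice inp (some 32) (some 40), PySem.Str.slice inp (some 64) (some 72), PySem.Str.slice inp (some 96) (some 104)],
    [PySem.Str.slice inp (some 8) (some 16), PySem.Str.slice inp (some 40) (some 48), PySem.Str.slice inp (some 72) (some 80), PySem.Str.slice inp (some 104) (some 112)],
    [PySem.Str.slice inp (some 16) (some 24), PySem.Str.slice inp (some 48) (some 56), PySem.Str.slice inp (some 80) (some 88), PySem.Str.slice inp (some 112) (some 120)],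
    [PySem.Str.slice inp (some 24) (some 32), PySem.Str.slice inp (some 56) (some 64), PySem.Str.slice inp (some 88) (some 96), PySem.Str.slice inp (some 120) (some 128)]] := by
  norm_num [to_state, toStateOuter, toStateInner]

-- ===== VERDICT (by name: the statement is the Claim_ definition above) =====
theorem to_state_spec : Claim_equal_to_state := by
  intro inp _
  show to_state inp = to_state_alt inp
  rw [a_eq, alt_eq]
  rw [show chunk inp 0 = PySem.Str.slice inp (some 0) (some 8) from by rw [chunk_eq]; norm_num]
  rw [show chunk inp 1 = PySem.Str.slice inp (some 8) (some 16) from by rw [chunk_eq]; norm_num]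
  rw [show chunk inp 2 = PySem.Str.slice inp (some 16) (some 24) from by rw [chunk_eq]; norm_num]
  rw [show chunk inp 3 = PySem.Str.slice inp (some 24) (some 32) from by rw [chunk_eq]; norm_num]
  rw [show chunk inp 4 = PySem.Str.slice inp (some 32) (some 40) from by rw [chunk_eq]; norm_num]
  rw [show chunk inp 5 = PySem.Str.slice inp (some 40) (some 48) from by rw [chunk_eq]; norm_num]
  rw [show chunk inp 6 = PySem.Str.slice inp (some 48) (some 56) from by rw [chunk_eq]; norm_num]
  rw [show chunk inp 7 = PySem.Str.slice inp (some 56) (some 64) from by rw [chunk_eq]; norm_num]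
  rw [show chunk inp 8 = PySem.Str.slice inp (some 64) (some 72) from by rw [chunk_eq]; norm_num]
  rw [show chunk inp 9 = PySem.Str.slice inp (some 72) (some 80) from by rw [chunk_eq]; norm_num]
  rw [show chunk inp 10 = PySem.Str.slice inp (some 80) (some 88) from by rw [chunk_eq]; norm_num]
  rw [show chunk inp 11 = PySem.Str.slice inp (some 88) (some 96) from by rw [chunk_eq]; norm_num]
  rw [show chunk inp 12 = PySem.Str.slice inp (some 96) (some 104) from by rw [chunk_eq]; norm_num]
  rw [show chunk inp 13 = PySem.Str.slice inp (some 104) (some 112) from by rw [chunk_eq]; norm_num]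
  rw [show chunk inp 14 = PySem.Str.slice inp (some 112) (some 120) from by rw [chunk_eq]; norm_num]
  rw [show chunk inp 15 = PySem.Str.slice inp (some 120) (some 128) from by rw [chunk_eq]; norm_num]
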